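-- pv_equiv track=rewrite | github.com/yoonseokham/algorithm | programmers/프로그래머스_불량사용자.py | solution
-- ===== SOURCE A (Python) =====
-- def matchedDeter(ban_id:str,user_id:str)->bool:
--     if len(ban_id)!=len(user_id):
--         return False
--     else:
--         for i,j in zip(list(ban_id),list(user_id)):
--             if i!=j and i!="*":
--                 return False
--     return True
--
-- def BackTracking(index:int,user_id:list,connect:list,counter:list,result:set)->None:
--     if index==len(connect):
--         if index==len(set(counter)):
--             result.add(tuple(sorted([user_id[i] for i in counter])))
--     else:
--         for i in connect[index]:
--             counter.append(i)
--             BackTracking(index+1,user_id,connect,counter,result)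
--             counter.pop()
--
-- def solution(user_id, banned_id):
--     connect=[[] for i in banned_id]
--     for index,i in enumerate(banned_id):
--         for jndex,j in enumerate(user_id):
--             if matchedDeter(i,j):
--                 connect[index].append(jndex)
--     result=set()
--     BackTracking(0,user_id,connect,[],result)
--     return len(result)
-- ===== SOURCE B (Python) =====
-- def matched(ban_id, user_id):
--     return len(ban_id) == len(user_id) and all(b == '*' or b == u for b, u in zip(ban_id, user_id))
--
--
-- def product(lists):
--     if not lists:
--         return [[]]
--     rest = product(lists[1:])
--     return [[i] + t for i in lists[0] for t in rest]
--
--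
-- def solution(user_id, banned_id):
--     connect = [[i for i, u in enumerate(user_id) if matched(b, u)] for b in banned_id]
--     result = set()
--     for combo in product(connect):
--         if len(set(combo)) == len(combo):
--             result.add(tuple(sorted(user_id[i] for i in combo)))
--     return len(result)
-- ===== Notes on version B (the rewrite author's own statement) =====
-- stated objective: alternative
-- what changed: Replaces the recursive BackTracking over a shared mutable counter/result with an explicit materialised cartesian product of the per-pattern candidate index lists, filtered for all-distinct combos and deduplicated by sorted user-id tuple; matchedDeter becomes a one-line len/zip/all check.
import Mathlib
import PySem

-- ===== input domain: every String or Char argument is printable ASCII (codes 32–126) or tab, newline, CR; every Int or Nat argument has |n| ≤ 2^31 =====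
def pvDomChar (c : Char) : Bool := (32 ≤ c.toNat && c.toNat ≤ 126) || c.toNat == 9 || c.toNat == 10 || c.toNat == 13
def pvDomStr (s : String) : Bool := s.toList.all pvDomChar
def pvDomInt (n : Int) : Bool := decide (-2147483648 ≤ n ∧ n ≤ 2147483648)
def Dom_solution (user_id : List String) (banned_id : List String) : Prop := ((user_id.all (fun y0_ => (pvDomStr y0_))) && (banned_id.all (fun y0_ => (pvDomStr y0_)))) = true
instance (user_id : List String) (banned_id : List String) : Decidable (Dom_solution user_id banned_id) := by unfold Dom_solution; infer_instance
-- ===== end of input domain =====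

-- B replaces A's recursive backtracking by an explicit materialised cartesian product of the
-- per-pattern candidate lists, filtered for distinct-index combos (objective: alternative).

-- ===== PORT A =====
-- the early-return character loop of matchedDeter
def matchedDeterGo : List (Char × Char) → Bool
  | [] => true
  | (i, j) :: rest => if i ≠ j ∧ i ≠ '*' then false else matchedDeterGo rest

def matchedDeter (ban_id : String) (user_id : String) : Bool :=
  if ban_id.toList.length ≠ user_id.toList.length then false
  else matchedDeterGo (ban_id.toList.zip user_id.toList)

-- BackTracking: structural recursion on the suffix connect[index:]; n = len(connect) (the value
-- of `index` at the terminal call); the mutated `result` set is threaded as an accumulator.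
-- user_id[i] is ported as pyGetD with default "": every i in counter comes from enumerate(user_id),
-- so the index is always in range and pyGetD is exact there.
def BackTracking (user_id : List String) (n : Nat) (rest : List (List Int)) (counter : List Int)
    (result : PySem.Set (List String)) : PySem.Set (List String) :=
  match rest with
  | [] =>
      if n == (PySem.Set.ofList counter).length then
        PySem.Set.add result
          (PySem.List.sorted (counter.map (fun i => PySem.List.pyGetD user_id i "")) (fun x => x) false)
      else result
  | c :: rs => c.foldl (fun res i => BackTracking user_id n rs (counter ++ [i]) res) result

def solution (user_id : List String) (banned_id : List String) : Int :=
  let connect := banned_id.map (fun i =>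
    (PySem.List.enumerate user_id 0).foldl
      (fun acc p => if matchedDeter i p.2 then acc ++ [p.1] else acc) ([] : List Int))
  let result := BackTracking user_id connect.length connect [] PySem.Set.empty
  (result.length : Int)

-- ===== PORT B =====
def matchedAlt (ban_id : String) (user_id : String) : Bool :=
  (ban_id.toList.length == user_id.toList.length)
    && (ban_id.toList.zip user_id.toList).all (fun p => p.1 == '*' || p.1 == p.2)

def productAlt : List (List Int) → List (List Int)
  | [] => [[]]
  | c :: rest =>
      let rs := productAlt rest
      c.flatMap (fun i => rs.map (fun t => i :: t))

def solution_alt (user_id : List String) (banned_id : List String) : Int :=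
  let connect := banned_id.map (fun b =>
    ((PySem.List.enumerate user_id 0).filter
      (fun p => matchedAlt b p.2)).map (fun p => p.1))
  let result := (productAlt connect).foldl
    (fun res combo =>
      if combo.length == (PySem.Set.ofList combo).length then
        PySem.Set.add res
          (PySem.List.sorted (combo.map (fun i => PySem.List.pyGetD user_id i "")) (fun x => x) false)
      else res) PySem.Set.empty
  (result.length : Int)

-- ===== PRECONDITION & SPEC =====
def Spec_solution (user_id : List String) (banned_id : List String) (out : Int) : Prop := out = solution_alt user_id banned_id
instance (user_id : List String) (banned_id : List String) (out : Int) : Decidable (Spec_solution user_id banned_id out) := by unfold Spec_solution; infer_instance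

-- ===== CLAIM (what is proved, stated in full; the proofs are below) =====
def Claim_equal_solution : Prop := ∀ (user_id : List String) (banned_id : List String), Dom_solution user_id banned_id → Spec_solution user_id banned_id (solution user_id banned_id)

-- ===== LEMMAS AND PROOFS =====
theorem matchedDeterGo_eq_all (l : List (Char × Char)) :
    matchedDeterGo l = l.all (fun p => p.1 == '*' || p.1 == p.2) := by
  induction l with
  | nil => rfl
  | cons p rest ih =>
      obtain ⟨i, j⟩ := p
      simp only [matchedDeterGo, List.all_cons]
      split_ifs with h
      · obtain ⟨h1, h2⟩ := h
        simp [h1, h2]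
      · rcases not_and_or.mp h with h1 | h1 <;> rw [not_not] at h1 <;> simp [h1, ih]

theorem matchedDeter_eq (b u : String) : matchedDeter b u = matchedAlt b u := by
  unfold matchedDeter matchedAlt
  rw [matchedDeterGo_eq_all]
  by_cases h : b.toList.length = u.toList.length
  · simp [h]
  · have h' : ¬ b.length = u.length := by simpa using h
    simp [h']

theorem length_mem_productAlt (cs : List (List Int)) (t : List Int)
    (ht : t ∈ productAlt cs) : t.length = cs.length := by
  induction cs generalizing t with
  | nil => simp [productAlt] at ht; simp [ht]
  | cons c rs ih =>
      simp only [productAlt, List.mem_flatMap, List.mem_map] at ht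
      obtain ⟨i, _, t', ht', rfl⟩ := ht
      simp [ih t' ht']

theorem backTracking_eq_foldl_product (user_id : List String) (n : Nat)
    (rest : List (List Int)) (counter : List Int) (res : PySem.Set (List String)) :
    BackTracking user_id n rest counter res
      = (productAlt rest).foldl
          (fun r t =>
            if n == (PySem.Set.ofList (counter ++ t)).length then
              PySem.Set.add r
                (PySem.List.sorted ((counter ++ t).map (fun i => PySem.List.pyGetD user_id i "")) (fun x => x) false)
            else r) res := by
  induction rest generalizing counter res with
  | nil => simp [BackTracking, productAlt]
  | cons c rs ih =>
      simp only [BackTracking, productAlt, List.foldl_flatMap, List.foldl_map]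
      refine PySem.List.foldl_congr_mem _ _ _ _ ?_
      intro acc i _
      rw [ih]
      refine PySem.List.foldl_congr_mem _ _ _ _ ?_
      intro r t _
      simp only [List.append_assoc, List.singleton_append]

theorem solution_eq (user_id : List String) (banned_id : List String) :
    solution user_id banned_id = solution_alt user_id banned_id := by
  simp only [solution, solution_alt]
  have hconn : (fun i =>
      (PySem.List.enumerate user_id 0).foldl
        (fun acc p => if matchedDeter i p.2 then acc ++ [p.1] else acc) ([] : List Int))
      = (fun b =>
      ((PySem.List.enumerate user_id 0).filter
        (fun p => matchedAlt b p.2)).map (fun p => p.1)) := by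
    funext b
    rw [PySem.List.foldl_append_if (fun p : Int × String => matchedDeter b p.2) (fun p : Int × String => p.1)]
    simp only [matchedDeter_eq, List.nil_append]
  rw [hconn, backTracking_eq_foldl_product]
  refine congrArg _ (congrArg _ (PySem.List.foldl_congr_mem _ _ _ _ ?_))
  intro acc t ht
  have h := length_mem_productAlt _ t ht
  simp [h]

-- ===== VERDICT (by name: the statement is the Claim_ definition above) =====
theorem solution_spec : Claim_equal_solution := by
  intro user_id banned_id _
  unfold Spec_solution
  exact solution_eq user_id banned_id
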